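-- pv_equiv track=rewrite | github.com/MrBrantCode/unitest_baseline | mut_generate/mist_train_cf/cf_64179/solution.py | fibonacci_sequences
-- ===== SOURCE A (Python) =====
-- def fibonacci_sequences(n):
--     if n <= 0:
--         return []
--     else:
--         fib_sequences = []
--         for _ in range(n):
--             fib_sequence = [0]
--             if n > 1:
--                 fib_sequence.append(1)
--             for i in range(2, n):
--                 next_number = fib_sequence[i-1] + fib_sequence[i-2]
--                 if next_number < n:
--                     fib_sequence.append(next_number)
--                 else:
--                     break
--             fib_sequences.append(fib_sequence)
--         return fib_sequences
-- ===== SOURCE B (Python) =====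
-- def fibonacci_sequences(n):
--     if n <= 0:
--         return []
--     seq = [0]
--     if n > 1:
--         seq.append(1)
--     a, b = 0, 1
--     while len(seq) < n:
--         c = a + b
--         if c < n:
--             seq.append(c)
--             a, b = b, c
--         else:
--             break
--     return [list(seq) for _ in range(n)]
-- ===== Notes on version B (the rewrite author's own statement) =====
-- stated objective: faster
-- what changed: B builds the Fibonacci-below-n sequence exactly once with a rolling pair (a,b) and a while-length guard instead of rebuilding it by indexing fib_sequence[i-1]+fib_sequence[i-2] inside each of the n outer iterations, then returns n copies of it.
import Mathlib
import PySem

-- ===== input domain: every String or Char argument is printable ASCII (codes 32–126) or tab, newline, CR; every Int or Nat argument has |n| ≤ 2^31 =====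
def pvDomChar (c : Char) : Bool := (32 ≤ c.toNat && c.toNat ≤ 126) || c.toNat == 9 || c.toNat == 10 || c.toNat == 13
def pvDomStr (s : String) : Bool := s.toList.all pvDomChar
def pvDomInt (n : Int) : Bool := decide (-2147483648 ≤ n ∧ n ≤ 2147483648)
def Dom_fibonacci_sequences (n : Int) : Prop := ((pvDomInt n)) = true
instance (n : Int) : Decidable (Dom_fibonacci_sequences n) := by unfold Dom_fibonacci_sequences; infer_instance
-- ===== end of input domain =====

-- B builds the Fibonacci-below-n sequence once with a rolling pair and a while-length guard,
-- then returns n copies, instead of A's rebuilding-by-indexing inside each of the n outer iterations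
-- (alternative decomposition; return values proved equal).


-- ===== PORT A =====
-- inner 'for i in range(2, n): next = seq[i-1] + seq[i-2]; if next < n: append else break'.
-- The indices i-1, i-2 are always in range in A (seq has length i when i is reached);
-- '.getD 0' only discharges the Option and is never taken on a reachable state.
def fibA_inner (n : Int) : List Int → List Int → List Int
  | [], seq => seq
  | i :: rest, seq =>
    let next := (PySem.List.pyGet? seq (i - 1)).getD 0 + (PySem.List.pyGet? seq (i - 2)).getD 0
    if next < n then fibA_inner n rest (seq ++ [next]) else seq

def fibonacci_sequences (n : Int) : List (List Int) :=
  if n ≤ 0 then []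
  else
    (PySem.List.pyRange 0 n 1).map (fun _ =>
      let seq := if n > 1 then [0, 1] else [(0 : Int)]
      fibA_inner n (PySem.List.pyRange 2 n 1) seq)

-- ===== PORT B =====
-- 'while len(seq) < n: c = a + b; if c < n: append, roll (a,b) else break'; fuel bounds the
-- number of iterations (each appends one element, so n.toNat iterations always suffice).
def fibB_loop (n : Int) : Nat → Int → Int → List Int → List Int
  | 0, _, _, seq => seq
  | fuel + 1, a, b, seq =>
    if (seq.length : Int) < n then
      let c := a + b
      if c < n then fibB_loop n fuel b c (seq ++ [c]) else seq
    else seq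

def fibonacci_sequences_alt (n : Int) : List (List Int) :=
  if n ≤ 0 then []
  else
    let seq0 := if n > 1 then [0, 1] else [(0 : Int)]
    let seq := fibB_loop n n.toNat 0 1 seq0
    (PySem.List.pyRange 0 n 1).map (fun _ => seq)

-- ===== PRECONDITION & SPEC =====
def Spec_fibonacci_sequences (n : Int) (out : List (List Int)) : Prop := out = fibonacci_sequences_alt n
instance (n : Int) (out : List (List Int)) : Decidable (Spec_fibonacci_sequences n out) := by unfold Spec_fibonacci_sequences; infer_instance

-- ===== CLAIM (what is proved, stated in full; the proofs are below) =====
def Claim_equal_fibonacci_sequences : Prop := ∀ (n : Int), Dom_fibonacci_sequences n → Spec_fibonacci_sequences n (fibonacci_sequences n)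

-- ===== LEMMAS AND PROOFS =====

-- The two loops agree when the sequence ends in [a, b] and B has enough fuel.
theorem loops_eq (fuel : Nat) (n a b : Int) (init : List Int)
    (hfuel : (n : Int) ≤ (init.length : Int) + 2 + fuel) :
    fibA_inner n (PySem.List.pyRange ((init.length : Int) + 2) n 1) (init ++ [a, b])
      = fibB_loop n fuel a b (init ++ [a, b]) := by
  induction fuel generalizing a b init with
  | zero =>
    have hr : PySem.List.pyRange ((init.length : Int) + 2) n 1 = [] := by
      simp [PySem.List.pyRange]; omega
    have hl : ¬ (((init ++ [a, b]).length : Int) < n) := by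
      simp; omega
    simp [hr, fibA_inner, fibB_loop]
  | succ fuel ih =>
    by_cases hlt : ((init.length : Int) + 2) < n
    · rw [PySem.List.pyRange_one_cons hlt]
      have hb : PySem.List.pyGet? (init ++ [a, b]) ((init.length : Int) + 2 - 1) = some b := by
        have : (init.length : Int) + 2 - 1 = (init ++ [a]).length := by simp; ring
        rw [this]
        have := PySem.List.pyGet?_append_length (pre := init ++ [a]) (y := b) (ys := ([] : List Int))
        simpa using this
      have ha : PySem.List.pyGet? (init ++ [a, b]) ((init.length : Int) + 2 - 2) = some a := by
        have : (init.length : Int) + 2 - 2 = (init.length : Int) := by ring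
        rw [this]
        exact PySem.List.pyGet?_append_length (pre := init) (y := a) (ys := [b])
      have hlen : (((init ++ [a, b]).length : Int) < n) := by simp; omega
      simp only [fibA_inner, fibB_loop, hb, ha, Option.getD_some, if_pos hlen]
      by_cases hc : b + a < n
      · have hc' : a + b < n := by omega
        rw [if_pos hc, if_pos hc']
        have e1 : init ++ [a, b] ++ [b + a] = (init ++ [a]) ++ [b, a + b] := by
          simp [Int.add_comm]
        have e2 : init ++ [a, b] ++ [a + b] = (init ++ [a]) ++ [b, a + b] := by simp
        rw [e1, e2]
        have hlen2 : ((init ++ [a]).length : Int) = (init.length : Int) + 1 := by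
          simp
        have := ih b (a + b) (init ++ [a]) (by rw [hlen2]; push_cast at hfuel; omega)
        rw [hlen2] at this
        have harg : (init.length : Int) + 1 + 2 = (init.length : Int) + 2 + 1 := by ring
        rw [harg] at this
        exact this
      · have hc' : ¬ a + b < n := by omega
        rw [if_neg hc, if_neg hc']
    · have hr : PySem.List.pyRange ((init.length : Int) + 2) n 1 = [] := by
        simp [PySem.List.pyRange]; omega
      have hl : ¬ (((init ++ [a, b]).length : Int) < n) := by
        simp; omega
      rw [hr]
      simp only [fibA_inner, fibB_loop, if_neg hl]

-- ===== VERDICT (by name: the statement is the Claim_ definition above) =====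
theorem fibonacci_sequences_spec : Claim_equal_fibonacci_sequences := by
  intro n _
  show fibonacci_sequences n = fibonacci_sequences_alt n
  unfold fibonacci_sequences fibonacci_sequences_alt
  by_cases h0 : n ≤ 0
  · simp [h0]
  · rw [if_neg h0, if_neg h0]
    by_cases h1 : n > 1
    · have hseq :
        fibA_inner n (PySem.List.pyRange 2 n 1) (if n > 1 then [0, 1] else [(0 : Int)])
          = fibB_loop n n.toNat 0 1 (if n > 1 then [0, 1] else [(0 : Int)]) := by
        rw [if_pos h1]
        have := loops_eq n.toNat n 0 1 [] (by simp; omega)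
        simpa using this
      rw [hseq]
    · -- n = 1: range(2, 1) is empty in A, and len(seq) = 1 < 1 fails in B
      have hn : n = 1 := by omega
      subst hn
      decide

-- note: 'decide' closes n = 1 since all terms are closed literals there.
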